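-- pv_equiv track=rewrite | github.com/Nagiome/laboratories | lab17_1.py | twin_primes_in_interval
-- ===== SOURCE A (Python) =====
-- def is_prime(k: int) -> bool:
--     """Проверка простоты числа."""
--     if k <= 1:
--         return False
--     if k <= 3:
--         return True
--     if k % 2 == 0:
--         return False
--     i = 3
--     while i * i <= k:
--         if k % i == 0:
--             return False
--         i += 2
--     return True
--
-- def twin_primes_in_interval(n: int):
--     """Возвращает список пар (p, p+2) — близнецов в отрезке [n, 2n]."""
--     if n <= 2:
--         raise ValueError("n должно быть больше 2")
--     low, high = n, 2 * n
--     twins = []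
--     for p in range(low, high - 1):
--         if is_prime(p) and p + 2 <= high and is_prime(p + 2):
--             twins.append((p, p + 2))
--     return twins
-- ===== SOURCE B (Python) =====
-- def twin_primes_in_interval(n: int):
--     """Sieve up to 2n, then scan [n, 2n-2] for twin pairs (p, p+2)."""
--     if n <= 2:
--         raise ValueError("n должно быть больше 2")
--     high = 2 * n
--     sieve = [True] * (high + 1)
--     sieve[0] = sieve[1] = False
--     i = 2
--     while i * i <= high:
--         j = i * i
--         while j <= high:
--             sieve[j] = False
--             j += i
--         i += 1
--     return [(p, p + 2) for p in range(n, high - 1) if sieve[p] and sieve[p + 2]]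
-- ===== Notes on version B (the rewrite author's own statement) =====
-- stated objective: faster
-- what changed: Replaces per-number trial division (odd-divisor loop up to sqrt(p) for every p in [n,2n]) by one sieve over [0,2n] that marks every multiple j of every i with i*i<=2n, then a single scan for twins.
import Mathlib
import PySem

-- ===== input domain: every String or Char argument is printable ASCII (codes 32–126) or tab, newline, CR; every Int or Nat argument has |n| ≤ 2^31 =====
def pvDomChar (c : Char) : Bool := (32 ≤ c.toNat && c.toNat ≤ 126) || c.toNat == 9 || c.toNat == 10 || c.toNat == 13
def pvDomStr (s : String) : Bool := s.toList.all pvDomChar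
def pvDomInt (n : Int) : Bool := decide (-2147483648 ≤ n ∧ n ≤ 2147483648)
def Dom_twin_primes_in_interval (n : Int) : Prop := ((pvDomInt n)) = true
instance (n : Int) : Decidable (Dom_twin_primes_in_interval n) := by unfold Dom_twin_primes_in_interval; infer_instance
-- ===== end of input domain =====

-- B replaces A's per-number trial division by a single sieve over [0, 2n]; same return value on n ≥ 3.

-- ===== PORT A =====
-- termination measures for the ports' while-loops (cited by name in decreasing_by)
theorem pv_dec_sq (c i : Int) (h : i * i ≤ c) : (c + 1 - (i + 1)).toNat < (c + 1 - i).toNat := by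
  have h1 : i ≤ i * i := by have := Int.le_self_sq i; rwa [sq] at this
  have hb : (0:Int) < c + 1 - i := sub_pos.mpr (lt_of_le_of_lt (le_trans h1 h) (lt_add_one c))
  exact (Int.toNat_lt_toNat hb).mpr (sub_lt_sub_left (lt_add_one i) (c + 1))

theorem pv_dec_sq2 (c i : Int) (h : i * i ≤ c) : (c + 1 - (i + 2)).toNat < (c + 1 - i).toNat := by
  have h1 : i ≤ i * i := by have := Int.le_self_sq i; rwa [sq] at this
  have hb : (0:Int) < c + 1 - i := sub_pos.mpr (lt_of_le_of_lt (le_trans h1 h) (lt_add_one c))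
  exact (Int.toNat_lt_toNat hb).mpr (sub_lt_sub_left (lt_add_of_pos_right i two_pos) (c + 1))

theorem pv_dec_mark (high i j : Int) (h : 0 < i ∧ j ≤ high) :
    (high + 1 - (j + i)).toNat < (high + 1 - j).toNat := by
  have hb : (0:Int) < high + 1 - j := sub_pos.mpr (lt_of_le_of_lt h.2 (lt_add_one high))
  exact (Int.toNat_lt_toNat hb).mpr (sub_lt_sub_left (lt_add_of_pos_right j h.1) (high + 1))

-- while i * i <= k: if k % i == 0: return False; i += 2
def trialLoop (k : Int) (i : Int) : Bool :=
  if h : i * i ≤ k then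
    if PySem.Int.mod k i = 0 then false
    else trialLoop k (i + 2)
  else true
termination_by (k + 1 - i).toNat
decreasing_by exact pv_dec_sq2 k i h

def is_prime (k : Int) : Bool :=
  if k ≤ 1 then false
  else if k ≤ 3 then true
  else if PySem.Int.mod k 2 = 0 then false
  else trialLoop k 3

-- A raises ValueError for n ≤ 2 (excluded by Pre_).
def twin_primes_in_interval (n : Int) : List (Int × Int) :=
  let low := n
  let high := 2 * n
  (PySem.List.pyRange low (high - 1) 1).foldl
    (fun twins p =>
      if is_prime p && decide (p + 2 ≤ high) && is_prime (p + 2) then twins ++ [(p, p + 2)]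
      else twins) []

-- ===== PORT B =====
-- inner while: j = i*i; while j <= high: sieve[j] = False; j += i
-- (the '0 < i' conjunct only makes the recursion total; every call has i ≥ 2)
def markMultiples (high i : Int) (j : Int) (s : List Bool) : List Bool :=
  if h : 0 < i ∧ j ≤ high then markMultiples high i (j + i) (s.set j.toNat false) else s
termination_by (high + 1 - j).toNat
decreasing_by exact pv_dec_mark high i j h

-- outer while: i = 2; while i * i <= high: … ; i += 1
def sieveLoop (high i : Int) (s : List Bool) : List Bool :=
  if h : i * i ≤ high then sieveLoop high (i + 1) (markMultiples high i (i * i) s) else s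
termination_by (high + 1 - i).toNat
decreasing_by exact pv_dec_sq high i h

-- B raises ValueError for n ≤ 2 just like A (excluded by Pre_).
-- sieve[p] / sieve[p+2] are always in range (0 ≤ p, p + 2 ≤ high < len), so getD is exact here.
def twin_primes_in_interval_alt (n : Int) : List (Int × Int) :=
  let high := 2 * n
  let s0 := ((List.replicate (high + 1).toNat true).set 0 false).set 1 false
  let s := sieveLoop high 2 s0
  (PySem.List.pyRange n (high - 1) 1).foldl
    (fun twins p =>
      if s.getD p.toNat false && s.getD (p + 2).toNat false then twins ++ [(p, p + 2)]
      else twins) []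

-- ===== PRECONDITION & SPEC =====
-- Pre_ excludes exactly n ≤ 2, on which A raises ValueError (B raises the same error there).
def Pre_twin_primes_in_interval (n : Int) : Prop := 3 ≤ n
instance (n : Int) : Decidable (Pre_twin_primes_in_interval n) := by
  unfold Pre_twin_primes_in_interval; infer_instance

def pvWitness_twin_primes_in_interval : Int := (5)

def Spec_twin_primes_in_interval (n : Int) (out : List (Int × Int)) : Prop :=
  out = twin_primes_in_interval_alt n
instance (n : Int) (out : List (Int × Int)) : Decidable (Spec_twin_primes_in_interval n out) := by
  unfold Spec_twin_primes_in_interval; infer_instance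

-- ===== CLAIM (what is proved, stated in full; the proofs are below) =====
def Claim_equal_twin_primes_in_interval : Prop :=
  ∀ (n : Int), Dom_twin_primes_in_interval n → Pre_twin_primes_in_interval n →
    Spec_twin_primes_in_interval n (twin_primes_in_interval n)

-- ===== LEMMAS AND PROOFS =====

theorem trialLoop_eq (k : Int) (hk : 5 ≤ k) (hodd : ¬ (2:Int) ∣ k) :
    ∀ (m : Nat) (i : Int), (k + 1 - i).toNat = m → 3 ≤ i → (2:Int) ∣ (i + 1) →
      (∀ d : Int, 2 ≤ d → d < i → ¬ d ∣ k) →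
      trialLoop k i = decide (Nat.Prime k.toNat) := by
  intro m
  induction m using Nat.strong_induction_on with
  | _ m IH =>
    intro i hm hi hieven hbelow
    have hKk : ((k.toNat : Int)) = k := Int.toNat_of_nonneg (by omega)
    rw [trialLoop]
    by_cases hii : i * i ≤ k
    · rw [dif_pos hii]
      by_cases hdvd : PySem.Int.mod k i = 0
      · rw [if_pos hdvd]
        have hdk : i ∣ k := (PySem.Int.mod_eq_zero_iff_dvd k i).mp hdvd
        have hik : i < k := by nlinarith
        have hdn : i.toNat ∣ k.toNat := by
          rw [← Int.natCast_dvd_natCast, Int.toNat_of_nonneg (by omega : (0:Int) ≤ i), hKk]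
          exact hdk
        have hnp : ¬ Nat.Prime k.toNat := by
          intro hp
          rcases hp.eq_one_or_self_of_dvd _ hdn with h | h <;> omega
        simp [hnp]
      · rw [if_neg hdvd]
        have hik : i < k := by nlinarith
        refine IH (k + 1 - (i + 2)).toNat (by omega) (i + 2) rfl (by omega) (by omega) ?_
        intro d hd2 hdlt hddvd
        rcases lt_or_ge d i with h | h
        · exact hbelow d hd2 h hddvd
        · rcases (by omega : d = i ∨ d = i + 1) with rfl | rfl
          · exact hdvd ((PySem.Int.mod_eq_zero_iff_dvd k d).mpr hddvd)
          · exact hodd (dvd_trans hieven hddvd)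
    · rw [dif_neg hii]
      have hp : Nat.Prime k.toNat := by
        rw [Nat.prime_def_le_sqrt]
        refine ⟨by omega, ?_⟩
        intro d hd2 hdsqrt hddvd
        have hdd : d * d ≤ k.toNat := Nat.le_sqrt.mp hdsqrt
        have hddI : (d : Int) * (d : Int) ≤ k := by
          have := (Int.ofNat_le.mpr hdd : ((d*d : Nat) : Int) ≤ (k.toNat : Int))
          rw [hKk] at this; push_cast at this; exact this
        have hdi : (d : Int) < i := by nlinarith [(by exact_mod_cast hd2 : (2:Int) ≤ (d:Int))]
        refine hbelow d (by exact_mod_cast hd2) hdi ?_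
        have := (Int.natCast_dvd_natCast.mpr hddvd : ((d:Nat) : Int) ∣ (k.toNat : Int))
        rwa [hKk] at this
      simp [hp]

theorem is_prime_eq (k : Int) : is_prime k = decide (Nat.Prime k.toNat) := by
  unfold is_prime
  by_cases h1 : k ≤ 1
  · rw [if_pos h1]
    have hnp : ¬ Nat.Prime k.toNat := by intro hp; have := hp.two_le; omega
    simp [hnp]
  · rw [if_neg h1]
    by_cases h3 : k ≤ 3
    · rw [if_pos h3]
      rcases (by omega : k = 2 ∨ k = 3) with rfl | rfl <;> decide
    · rw [if_neg h3]
      by_cases h2 : PySem.Int.mod k 2 = 0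
      · rw [if_pos h2]
        have hdvd : (2:Int) ∣ k := (PySem.Int.mod_eq_zero_iff_dvd k 2).mp h2
        have hdn : 2 ∣ k.toNat := by
          rw [← Int.natCast_dvd_natCast]
          push_cast
          rwa [Int.toNat_of_nonneg (by omega)]
        have hnp : ¬ Nat.Prime k.toNat := by
          intro hp
          rcases hp.eq_one_or_self_of_dvd _ hdn with h | h <;> omega
        simp [hnp]
      · rw [if_neg h2]
        have hodd : ¬ (2:Int) ∣ k := fun hd => h2 ((PySem.Int.mod_eq_zero_iff_dvd k 2).mpr hd)
        have hk5 : 5 ≤ k := by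
          rcases (by omega : k = 4 ∨ 5 ≤ k) with rfl | h
          · exact absurd ⟨2, by ring⟩ hodd
          · exact h
        exact trialLoop_eq k hk5 hodd _ 3 rfl (by omega) ⟨2, by ring⟩
          (fun d hd2 hd3 hdd => hodd ((by omega : d = 2) ▸ hdd))

theorem markMultiples_length (high i j : Int) (s : List Bool) :
    (markMultiples high i j s).length = s.length := by
  fun_induction markMultiples with
  | case1 j s h ih => rw [ih, List.length_set]
  | case2 => rfl

theorem markMultiples_getD (high i : Int) (hi : 0 < i) :
    ∀ (m : Nat) (j : Int) (s : List Bool), (high + 1 - j).toNat = m → 0 ≤ j →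
      high < (s.length : Int) → ∀ (k : Nat),
      (markMultiples high i j s).getD k false
        = if j ≤ (k : Int) ∧ (k : Int) ≤ high ∧ i ∣ ((k : Int) - j)
          then false else s.getD k false := by
  intro m
  induction m using Nat.strong_induction_on with
  | _ m IH =>
    intro j s hm hj hlen k
    rw [markMultiples]
    by_cases hjh : j ≤ high
    · rw [dif_pos ⟨hi, hjh⟩]
      rw [IH (high + 1 - (j + i)).toNat (by omega) (j + i) _ rfl (by omega)
        (by rw [List.length_set]; exact hlen) k]
      by_cases hkh : (k : Int) ≤ high
      · by_cases hkj : (k : Int) = j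
        · have hkj' : (k : Int) = j := hkj
          have hklen : k < s.length := by omega
          have hset : (s.set j.toNat false).getD k false = false := by
            rw [List.getD_eq_getElem?_getD, List.getElem?_set]
            simp [show j.toNat = k by omega, hklen]
          rw [if_neg (by rintro ⟨a, -, -⟩; omega), hset,
            if_pos ⟨by omega, hkh, by rw [hkj']; simp⟩]
        · have hset : (s.set j.toNat false).getD k false = s.getD k false := by
            rw [List.getD_eq_getElem?_getD, List.getElem?_set,
              if_neg (by omega : ¬ j.toNat = k), ← List.getD_eq_getElem?_getD]
          rw [hset]
          have hdvdIff : (i ∣ ((k : Int) - (j + i))) ↔ i ∣ ((k : Int) - j) := by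
            constructor
            · intro h
              have e : (k : Int) - j = ((k : Int) - (j + i)) + i := by ring
              rw [e]; exact dvd_add h dvd_rfl
            · intro h
              have e : (k : Int) - (j + i) = ((k : Int) - j) - i := by ring
              rw [e]; exact dvd_sub h dvd_rfl
          by_cases hc : i ∣ ((k : Int) - j)
          · by_cases hjk : j ≤ (k : Int)
            · have hle : i ≤ (k : Int) - j := Int.le_of_dvd (by omega) hc
              rw [if_pos ⟨by omega, hkh, hdvdIff.mpr hc⟩, if_pos ⟨hjk, hkh, hc⟩]
            · rw [if_neg (by rintro ⟨a, -, -⟩; omega), if_neg (by rintro ⟨a, -, -⟩; omega)]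
          · rw [if_neg (fun h => hc (hdvdIff.mp h.2.2)), if_neg (fun h => hc h.2.2)]
      · have hkj : ¬ (k : Int) = j := by omega
        have hset : (s.set j.toNat false).getD k false = s.getD k false := by
          rw [List.getD_eq_getElem?_getD, List.getElem?_set,
            if_neg (by omega : ¬ j.toNat = k), ← List.getD_eq_getElem?_getD]
        rw [hset, if_neg (by rintro ⟨-, a, -⟩; omega), if_neg (by rintro ⟨-, a, -⟩; omega)]
    · rw [dif_neg (by rintro ⟨-, a⟩; omega), if_neg (by rintro ⟨a, b, -⟩; omega)]

theorem sieveLoop_getD (high : Int) :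
    ∀ (m : Nat) (i : Int) (s : List Bool), (high + 1 - i).toNat = m → 2 ≤ i →
      high < (s.length : Int) → ∀ (k : Nat),
      ((sieveLoop high i s).getD k false = false
        ↔ (∃ d : Int, i ≤ d ∧ d * d ≤ high ∧ d * d ≤ (k : Int) ∧ (k : Int) ≤ high ∧ d ∣ (k : Int))
          ∨ s.getD k false = false) := by
  intro m
  induction m using Nat.strong_induction_on with
  | _ m IH =>
    intro i s hm hi hlen k
    rw [sieveLoop]
    by_cases hii : i * i ≤ high
    · rw [dif_pos hii]
      have hii0 : (0:Int) ≤ i * i := mul_self_nonneg i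
      have hilow : i ≤ i * i := by nlinarith
      rw [IH (high + 1 - (i + 1)).toNat (by omega) (i + 1) _ rfl (by omega)
        (by rw [markMultiples_length]; exact hlen) k]
      rw [markMultiples_getD high i (by omega) (high + 1 - i * i).toNat (i * i) s rfl hii0 hlen k]
      have hdvdIff : (i ∣ ((k : Int) - i * i)) ↔ i ∣ (k : Int) := by
        constructor
        · intro h
          have e : (k : Int) = ((k : Int) - i * i) + i * i := by ring
          rw [e]; exact dvd_add h (dvd_mul_left i i)
        · intro h
          exact dvd_sub h (dvd_mul_left i i)
      constructor
      · rintro (⟨d, hd, rest⟩ | h)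
        · exact Or.inl ⟨d, by omega, rest⟩
        · by_cases hc : i * i ≤ (k : Int) ∧ (k : Int) ≤ high ∧ i ∣ ((k : Int) - i * i)
          · exact Or.inl ⟨i, le_refl i, hii, hc.1, hc.2.1, hdvdIff.mp hc.2.2⟩
          · rw [if_neg hc] at h
            exact Or.inr h
      · rintro (⟨d, hd, h2, h3, h4, h5⟩ | h)
        · by_cases hdi : d = i
          · subst hdi
            exact Or.inr (by rw [if_pos ⟨h3, h4, hdvdIff.mpr h5⟩])
          · exact Or.inl ⟨d, by omega, h2, h3, h4, h5⟩
        · refine Or.inr ?_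
          split
          · rfl
          · exact h
    · rw [dif_neg hii]
      constructor
      · exact Or.inr
      · rintro (⟨d, hd, h2, h3, h4, h5⟩ | h)
        · have : i * i ≤ d * d := mul_le_mul hd hd (by omega) (by omega)
          omega
        · exact h

theorem sieve_prime (n : Int) (hn : 3 ≤ n) (k : Nat) (hk2 : 2 ≤ (k : Int))
    (hkh : (k : Int) ≤ 2 * n) :
    (sieveLoop (2 * n) 2 (((List.replicate (2 * n + 1).toNat true).set 0 false).set 1 false)).getD k false
      = decide (Nat.Prime k) := by
  have hlen : (2 * n) < (((((List.replicate (2 * n + 1).toNat true).set 0 false).set 1 false).length : Nat) : Int) := by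
    simp only [List.length_set, List.length_replicate]; omega
  have hs0k : ((((List.replicate (2 * n + 1).toNat true).set 0 false).set 1 false)).getD k false = true := by
    rw [List.getD_eq_getElem?_getD, List.getElem?_set, if_neg (by omega : ¬ (1:Nat) = k),
      List.getElem?_set, if_neg (by omega : ¬ (0:Nat) = k), List.getElem?_replicate,
      if_pos (by omega : k < (2 * n + 1).toNat)]
    rfl
  have hiff := sieveLoop_getD (2 * n) (2 * n + 1 - 2).toNat 2
    (((List.replicate (2 * n + 1).toNat true).set 0 false).set 1 false) rfl (by omega) hlen k
  rw [hs0k] at hiff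
  by_cases hp : Nat.Prime k
  · have hne : ¬ ((sieveLoop (2 * n) 2 (((List.replicate (2 * n + 1).toNat true).set 0 false).set 1 false)).getD k false = false) := by
      intro hf
      rcases hiff.mp hf with ⟨d, hd2, hdh, hdk, hkh', hdvd⟩ | hcontra
      · have hd0 : (0:Int) ≤ d := by omega
        have hdt : ((d.toNat : Int)) = d := Int.toNat_of_nonneg hd0
        have hdn : d.toNat ∣ k := by
          rw [← Int.natCast_dvd_natCast]; rwa [hdt]
        rcases hp.eq_one_or_self_of_dvd _ hdn with h | h
        · omega
        · have hdk' : d = (k : Int) := by omega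
          nlinarith
      · simp at hcontra
    cases hgd : (sieveLoop (2 * n) 2 (((List.replicate (2 * n + 1).toNat true).set 0 false).set 1 false)).getD k false
    · exact absurd hgd hne
    · simp [hp]
  · have hk1 : k ≠ 1 := by omega
    have hmp := Nat.minFac_prime hk1
    have hsq : k.minFac * k.minFac ≤ k := by
      have := Nat.minFac_sq_le_self (by omega : 0 < k) hp
      rwa [Nat.pow_two] at this
    have hgd : (sieveLoop (2 * n) 2 (((List.replicate (2 * n + 1).toNat true).set 0 false).set 1 false)).getD k false = false := by
      refine hiff.mpr (Or.inl ⟨(k.minFac : Int), ?_, ?_, ?_, hkh, ?_⟩)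
      · exact_mod_cast hmp.two_le
      · calc ((k.minFac : Int)) * (k.minFac : Int) = ((k.minFac * k.minFac : Nat) : Int) := by push_cast; ring
          _ ≤ (k : Int) := by exact_mod_cast hsq
          _ ≤ 2 * n := hkh
      · calc ((k.minFac : Int)) * (k.minFac : Int) = ((k.minFac * k.minFac : Nat) : Int) := by push_cast; ring
          _ ≤ (k : Int) := by exact_mod_cast hsq
      · exact_mod_cast Nat.minFac_dvd k
    rw [hgd]
    simp [hp]

-- ===== VERDICT (by name: the statement is the Claim_ definition above) =====
theorem twin_primes_in_interval_spec : Claim_equal_twin_primes_in_interval := by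
  intro n hdom hpre
  have hn : 3 ≤ n := hpre
  unfold Spec_twin_primes_in_interval
  simp only [twin_primes_in_interval, twin_primes_in_interval_alt]
  apply PySem.List.foldl_congr_mem
  intro acc p hp
  rw [PySem.List.mem_pyRange_one] at hp
  have h1 := sieve_prime n hn p.toNat (by omega) (by omega)
  have h2 := sieve_prime n hn (p + 2).toNat (by omega) (by omega)
  rw [is_prime_eq p, is_prime_eq (p + 2), ← h1, ← h2,
    decide_eq_true (show p + 2 ≤ 2 * n by omega), Bool.and_true]
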